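-- pv_equiv track=rewrite | github.com/QuentinDeHaes/Unboundedness-for-1-VASS | Bounded_coverability_with_obstacles.py | _prune_congruence
-- ===== SOURCE A (Python) =====
-- def _prune_congruence(reachable_in_k, L, n, W):
--     """
--     the first pruning step of the algorithm
--     :param reachable_in_k: the original set of reachable values to be pruned
--
--     :param L:
--     :param n:
--     :return:
--     :return: the pruned reachable_in_k
--     """
--
--     for key in reachable_in_k:
--         dic = dict()
--         for value in reachable_in_k[key]:
--             if value % W not in dic:
--                 dic[value % W] = []
--
--             dic[value % W].append(value)
--         all_remaining_vals = list()
--         for key2 in dic: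
--             dic[key2] = sorted(dic[key2])
--             dic[key2] = dic[key2][: min(len(dic[key2]), n + L)]
--             all_remaining_vals += dic[key2]
--
--         reachable_in_k[key] = all_remaining_vals
--
--     return reachable_in_k
-- ===== SOURCE B (Python) =====
-- def _prune_congruence(reachable_in_k, L, n, W):
--     # Same pruning, mutating reachable_in_k in place like the original:
--     # sort each key's values ONCE globally instead of per residue group; for each
--     # residue (in first-appearance order) the kept bucket is just the residue's
--     # slice of that one sorted list, truncated to n + L.
--     cap = n + L
--     for key in reachable_in_k:
--         vals = reachable_in_k[key]
--         order = list(dict.fromkeys(v % W for v in vals))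
--         svals = sorted(vals)
--         reachable_in_k[key] = [v for r in order
--                                for v in [x for x in svals if x % W == r][:cap]]
--     return reachable_in_k
-- ===== Notes on version B (the rewrite author's own statement) =====
-- stated objective: simpler
-- what changed: B drops the per-key bucket dict entirely: it sorts each key's value list once globally, records residue first-appearance order with dict.fromkeys, and builds the result as a flat comprehension taking each residue's slice of the one sorted list truncated to n+L, instead of A's group-into-dict / sort-each-bucket / truncate / concatenate loop.
import Mathlib
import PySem

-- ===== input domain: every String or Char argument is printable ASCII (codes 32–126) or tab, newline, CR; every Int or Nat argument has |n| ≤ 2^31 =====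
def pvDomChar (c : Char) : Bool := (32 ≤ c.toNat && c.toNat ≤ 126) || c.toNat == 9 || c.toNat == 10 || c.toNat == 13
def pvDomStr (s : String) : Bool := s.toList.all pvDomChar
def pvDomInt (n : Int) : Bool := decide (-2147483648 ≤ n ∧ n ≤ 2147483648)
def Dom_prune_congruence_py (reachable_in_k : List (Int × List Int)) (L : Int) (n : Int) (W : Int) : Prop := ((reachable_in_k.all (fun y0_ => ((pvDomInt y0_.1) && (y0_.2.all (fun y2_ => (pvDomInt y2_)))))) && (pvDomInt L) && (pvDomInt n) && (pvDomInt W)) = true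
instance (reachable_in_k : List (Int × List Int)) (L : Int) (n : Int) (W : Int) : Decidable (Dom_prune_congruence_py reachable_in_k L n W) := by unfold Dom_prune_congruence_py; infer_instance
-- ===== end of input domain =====

-- B removes A's per-key bucket dict: one global sort per key, then per residue
-- (in first-appearance order) a filtered slice of that sorted list, truncated to n+L.
-- Objective: simpler decomposition, same exact return value.
-- Note: the Python A mutates reachable_in_k in place (B does the same); the equivalence
-- proved here is about the returned value (the same mutated dict).


-- ===== PORT A =====
-- for value in reachable_in_k[key]: if value % W not in dic: dic[value % W] = []; dic[value % W].append(value)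
def pruneBuildStep (W : Int) (dic : PySem.Dict Int (List Int)) (value : Int) : PySem.Dict Int (List Int) :=
  let dic := if dic.contains (PySem.Int.mod value W) then dic
             else dic.insert (PySem.Int.mod value W) ([] : List Int)
  dic.modify (PySem.Int.mod value W) [] (fun l => l ++ [value])

-- for key2 in dic: dic[key2] = sorted(dic[key2]); dic[key2] = dic[key2][: min(len(dic[key2]), n + L)]; all_remaining_vals += dic[key2]
def pruneEmitStep (L : Int) (n : Int) (st : PySem.Dict Int (List Int) × List Int) (key2 : Int) :
    PySem.Dict Int (List Int) × List Int :=
  let g := PySem.List.sorted (st.1.getD key2 []) (fun x => x)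
  let dic := st.1.insert key2 g
  let g2 := PySem.List.slice g none (some (min (g.length : Int) (n + L)))
  let dic := dic.insert key2 g2
  (dic, st.2 ++ g2)

def prune_congruence_py (reachable_in_k : List (Int × List Int)) (L : Int) (n : Int) (W : Int) : List (Int × List Int) :=
  reachable_in_k.map (fun kv =>
    let dic := kv.2.foldl (pruneBuildStep W) PySem.Dict.empty
    let res := dic.keys.foldl (pruneEmitStep L n) (dic, [])
    (kv.1, res.2))

-- ===== PORT B =====
def prune_congruence_py_alt (reachable_in_k : List (Int × List Int)) (L : Int) (n : Int) (W : Int) : List (Int × List Int) :=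
  let cap := n + L
  reachable_in_k.map (fun kv =>
    let order := PySem.List.dedup (kv.2.map (fun v => PySem.Int.mod v W))
    let svals := PySem.List.sorted kv.2 (fun x => x)
    (kv.1, order.flatMap (fun r =>
      PySem.List.slice (svals.filter (fun x => PySem.Int.mod x W == r)) none (some cap))))

-- ===== PRECONDITION & SPEC =====
-- Pre_ excludes only inputs where the Python A raises: W = 0 together with any non-empty
-- value list makes 'value % W' raise ZeroDivisionError (B raises there too).
def Pre_prune_congruence_py (reachable_in_k : List (Int × List Int)) (L : Int) (n : Int) (W : Int) : Prop :=
  W ≠ 0 ∨ reachable_in_k.all (fun kv => kv.2.isEmpty) = true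
instance (reachable_in_k : List (Int × List Int)) (L : Int) (n : Int) (W : Int) : Decidable (Pre_prune_congruence_py reachable_in_k L n W) := by unfold Pre_prune_congruence_py; infer_instance

def pvWitness_prune_congruence_py : (List (Int × List Int)) × Int × Int × Int :=
  ([(0, [5, 3, 8, 3, -2]), (7, [4, -4, 1])], 1, 1, 2)

def Spec_prune_congruence_py (reachable_in_k : List (Int × List Int)) (L : Int) (n : Int) (W : Int) (out : List (Int × List Int)) : Prop := out = prune_congruence_py_alt reachable_in_k L n W
instance (reachable_in_k : List (Int × List Int)) (L : Int) (n : Int) (W : Int) (out : List (Int × List Int)) : Decidable (Spec_prune_congruence_py reachable_in_k L n W out) := by unfold Spec_prune_congruence_py; infer_instance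

-- ===== CLAIM (what is proved, stated in full; the proofs are below) =====
def Claim_equal_prune_congruence_py : Prop := ∀ (reachable_in_k : List (Int × List Int)) (L : Int) (n : Int) (W : Int), Dom_prune_congruence_py reachable_in_k L n W → Pre_prune_congruence_py reachable_in_k L n W → Spec_prune_congruence_py reachable_in_k L n W (prune_congruence_py reachable_in_k L n W)

-- ===== LEMMAS AND PROOFS =====

-- the contains-guard + modify of A's grouping loop is exactly Dict.modify
lemma pruneBuildStep_eq_modify (W : Int) (d : PySem.Dict Int (List Int)) (v : Int) :
    pruneBuildStep W d v = d.modify (PySem.Int.mod v W) [] (fun l => l ++ [v]) := by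
  unfold pruneBuildStep
  by_cases h : d.contains (PySem.Int.mod v W)
  · simp [h]
  · simp only [h, Bool.false_eq_true, if_false, PySem.Dict.modify,
      PySem.Dict.getD_insert_self, PySem.Dict.insert_insert_self,
      PySem.Dict.getD_of_not_contains d _ (by simpa using h)]

-- values of A's grouping dict: each residue's bucket is the residue's filter of the original list
lemma getD_build (W : Int) (vals : List Int) (r : Int) :
    (vals.foldl (pruneBuildStep W) PySem.Dict.empty).getD r [] =
      vals.filter (fun v => PySem.Int.mod v W == r) := by
  have hstep : (fun (d : PySem.Dict Int (List Int)) v => pruneBuildStep W d v)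
      = fun d v => d.modify (PySem.Int.mod v W) [] (fun l => l ++ [v]) := by
    funext d v; exact pruneBuildStep_eq_modify W d v
  have hmap : vals.foldl (fun (d : PySem.Dict Int (List Int)) v => d.modify (PySem.Int.mod v W) [] (fun l => l ++ [v])) PySem.Dict.empty
      = (vals.map (fun v => (PySem.Int.mod v W, v))).foldl
          (fun d p => d.modify p.1 [] (fun l => l ++ [p.2])) PySem.Dict.empty := by
    rw [List.foldl_map]
  show (vals.foldl (fun d v => pruneBuildStep W d v) PySem.Dict.empty).getD r [] = _
  rw [hstep, hmap, PySem.Dict.getD_foldl_modify_append]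
  simp [List.filter_map, Function.comp_def]

-- keys of A's grouping dict: the residues in first-appearance order
lemma keys_build (W : Int) (vals : List Int) :
    (vals.foldl (pruneBuildStep W) PySem.Dict.empty).keys =
      PySem.List.dedup (vals.map (fun v => PySem.Int.mod v W)) := by
  have hstep : (fun (d : PySem.Dict Int (List Int)) v => pruneBuildStep W d v)
      = fun d v => d.modify ((fun v => PySem.Int.mod v W) v) []
          ((fun (_ : PySem.Dict Int (List Int)) (x : Int) (l : List Int) => l ++ [x]) d v) := by
    funext d v; exact pruneBuildStep_eq_modify W d v
  show (vals.foldl (fun d v => pruneBuildStep W d v) PySem.Dict.empty).keys = _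
  rw [hstep, PySem.Dict.keys_foldl_modify_key vals (fun v => PySem.Int.mod v W) []
    (fun (_ : PySem.Dict Int (List Int)) (x : Int) (l : List Int) => l ++ [x])]
  rw [PySem.List.dedup_eq_ofList]
  rfl

-- a slice stop of min(len(xs), c) is the same slice as stop c
lemma slice_min_len (xs : List Int) (c : Int) :
    PySem.List.slice xs none (some (min (xs.length : Int) c)) = PySem.List.slice xs none (some c) := by
  rcases (le_or_gt 0 c) with hc | hc
  · rw [PySem.List.slice_to xs (by omega : (0:Int) ≤ min (xs.length:Int) c), PySem.List.slice_to xs hc]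
    have h1 : (min (xs.length : Int) c).toNat = min xs.length c.toNat := by omega
    rw [h1]
    rcases le_total xs.length c.toNat with h | h
    · rw [min_eq_left h, List.take_length, List.take_of_length_le h]
    · rw [min_eq_right h]
  · rw [min_eq_right (by omega : c ≤ (xs.length : Int))]

-- sorting a filtered list = filtering the sorted list
lemma sorted_filter (p : Int → Bool) (vals : List Int) :
    PySem.List.sorted (vals.filter p) (fun x => x) = (PySem.List.sorted vals (fun x => x)).filter p := by
  apply PySem.List.sorted_id_eq_of_perm_of_pairwise
  · exact (PySem.List.sorted_perm vals (fun x => x) false).filter p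
  · exact List.Pairwise.sublist List.filter_sublist (PySem.List.sorted_pairwise vals (fun x => x))

-- A's emit loop over distinct keys whose buckets read F appends the per-key truncated groups
lemma emit_loop (L n : Int) (F : Int → List Int) :
    ∀ (ks : List Int) (dic : PySem.Dict Int (List Int)) (acc : List Int), ks.Nodup →
      (∀ k ∈ ks, dic.getD k [] = F k) →
      (ks.foldl (pruneEmitStep L n) (dic, acc)).2 = acc ++ ks.flatMap (fun r =>
        PySem.List.slice (PySem.List.sorted (F r) (fun x => x)) none
          (some (min ((PySem.List.sorted (F r) (fun x => x)).length : Int) (n + L)))) := by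
  intro ks
  induction ks with
  | nil => intro dic acc _ _; simp
  | cons k ks ih =>
    intro dic acc hnd hF
    rw [List.foldl_cons]
    have hk : dic.getD k [] = F k := hF k (by simp)
    have hstep : pruneEmitStep L n (dic, acc) k =
        (((dic.insert k (PySem.List.sorted (F k) (fun x => x))).insert k
            (PySem.List.slice (PySem.List.sorted (F k) (fun x => x)) none
              (some (min ((PySem.List.sorted (F k) (fun x => x)).length : Int) (n + L))))),
         acc ++ PySem.List.slice (PySem.List.sorted (F k) (fun x => x)) none
              (some (min ((PySem.List.sorted (F k) (fun x => x)).length : Int) (n + L)))) := by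
      simp only [pruneEmitStep, hk]
    rw [hstep, ih _ _ hnd.of_cons]
    · simp
    · intro k' hk'
      have hne : k' ≠ k := by
        rintro rfl; exact (List.nodup_cons.mp hnd).1 hk'
      rw [PySem.Dict.getD_insert_of_ne _ _ _ hne, PySem.Dict.getD_insert_of_ne _ _ _ hne]
      exact hF k' (by simp [hk'])

-- the per-key results agree
lemma per_key_eq (L n W : Int) (kv : Int × List Int) :
    (kv.1, ((kv.2.foldl (pruneBuildStep W) PySem.Dict.empty).keys.foldl (pruneEmitStep L n)
        ((kv.2.foldl (pruneBuildStep W) PySem.Dict.empty), [])).2)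
      = (kv.1, (PySem.List.dedup (kv.2.map (fun v => PySem.Int.mod v W))).flatMap (fun r =>
          PySem.List.slice ((PySem.List.sorted kv.2 (fun x => x)).filter
            (fun x => PySem.Int.mod x W == r)) none (some (n + L)))) := by
  have hkeys := keys_build W kv.2
  have hnd : (kv.2.foldl (pruneBuildStep W) PySem.Dict.empty).keys.Nodup := by
    rw [hkeys]; exact PySem.List.nodup_dedup _
  rw [emit_loop L n (fun r => kv.2.filter (fun v => PySem.Int.mod v W == r)) _ _ [] hnd
      (fun k _ => getD_build W kv.2 k), hkeys]
  rw [List.nil_append]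
  refine congrArg _ ?_
  exact congrFun (congrArg List.flatMap (funext fun r => by
    rw [slice_min_len, sorted_filter])) _

-- ===== VERDICT (by name: the statement is the Claim_ definition above) =====
theorem prune_congruence_py_spec : Claim_equal_prune_congruence_py := by
  intro reachable_in_k L n W _ _
  unfold Spec_prune_congruence_py prune_congruence_py prune_congruence_py_alt
  exact List.map_congr_left (fun kv _ => per_key_eq L n W kv)
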